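-- pv_equiv track=rewrite | github.com/EverlessDrop41/PasswordSecurityTester | Python Version/password.py | typesContained
-- ===== SOURCE A (Python) =====
-- def typesContained(usrString):
--     typesNum = 0 #Initialise a variable to store the different types in the pasword
--     #Number Check
--     for let in usrString: #Loop through the characters in the usrString parameter
--         if let.isdigit(): #Check if the character is a number
--             typesNum += 1 #If  it is add one to the types
--             break #Stop looping so the number is only added once
--     #Upper case check
--     for let in usrString: #Loop through the characters in the usrString parameter
--         if let.isupper(): #Check if letter is upper case
--             typesNum += 1 #If  it is add one to the types
--             break #Stop looping so the number is only added once
--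
--     #Lower case check
--     for let in usrString: #Loop through the characters in the usrString parameter
--         if let.islower(): #Check if letter is lower case
--             typesNum += 1 #If  it is add one to the types
--             break #Stop looping so the number is only added once
--
--     return typesNum #Return the different types
-- ===== SOURCE B (Python) =====
-- def typesContained(usrString):
--     has_digit = has_upper = has_lower = False
--     for ch in usrString:
--         if ch.isdigit():
--             has_digit = True
--         elif ch.isupper():
--             has_upper = True
--         elif ch.islower():
--             has_lower = True
--         if has_digit and has_upper and has_lower:
--             break
--     return int(has_digit) + int(has_upper) + int(has_lower)
-- ===== Notes on version B (the rewrite author's own statement) =====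
-- stated objective: alternative
-- what changed: Fuses A's three separate short-circuiting scans into a single pass that maintains three boolean flags and breaks early once all three are set.
import Mathlib
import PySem

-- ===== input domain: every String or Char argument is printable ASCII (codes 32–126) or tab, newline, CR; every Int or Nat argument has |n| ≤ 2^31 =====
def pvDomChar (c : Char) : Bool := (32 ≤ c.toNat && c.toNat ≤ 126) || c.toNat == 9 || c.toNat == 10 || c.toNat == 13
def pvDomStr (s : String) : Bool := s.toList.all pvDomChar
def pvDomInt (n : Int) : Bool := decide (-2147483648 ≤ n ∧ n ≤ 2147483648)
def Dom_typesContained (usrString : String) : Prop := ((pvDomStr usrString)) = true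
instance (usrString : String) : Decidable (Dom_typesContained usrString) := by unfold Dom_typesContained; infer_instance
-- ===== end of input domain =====

-- B fuses A's three separate short-circuiting scans into one pass over the string
-- maintaining three boolean flags with an early break (objective: alternative decomposition, same O(n) cost).


-- ===== PORT A =====
-- one of A's for-loops: walk the characters, add 1 to the accumulator and break at the first match
def pvScanA (p : Char → Bool) (acc : Int) : List Char → Int
  | [] => acc
  | c :: r => if p c then acc + 1 else pvScanA p acc r

def typesContained (usrString : String) : Int :=
  let t0 : Int := 0
  let t1 := pvScanA PySem.Chars.isdigit t0 usrString.toList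
  let t2 := pvScanA PySem.Chars.isupper t1 usrString.toList
  pvScanA PySem.Chars.islower t2 usrString.toList

-- ===== PORT B =====
def pvFlagSum (d u lo : Bool) : Int :=
  (if d then (1:Int) else 0) + (if u then (1:Int) else 0) + (if lo then (1:Int) else 0)

-- B's single loop: set a flag per character (if/elif chain), break once all three are set
def pvGoB (d u lo : Bool) : List Char → Int
  | [] => pvFlagSum d u lo
  | c :: r =>
    let d' := if PySem.Chars.isdigit c then true else d
    let u' := if !PySem.Chars.isdigit c && PySem.Chars.isupper c then true else u
    let lo' := if !PySem.Chars.isdigit c && !PySem.Chars.isupper c && PySem.Chars.islower c then true else lo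
    if d' && u' && lo' then pvFlagSum d' u' lo' else pvGoB d' u' lo' r

def typesContained_alt (usrString : String) : Int :=
  pvGoB false false false usrString.toList

-- ===== PRECONDITION & SPEC =====
def Spec_typesContained (usrString : String) (out : Int) : Prop := out = typesContained_alt usrString
instance (usrString : String) (out : Int) : Decidable (Spec_typesContained usrString out) := by unfold Spec_typesContained; infer_instance

-- ===== CLAIM (what is proved, stated in full; the proofs are below) =====
def Claim_equal_typesContained : Prop := ∀ (usrString : String), Dom_typesContained usrString → Spec_typesContained usrString (typesContained usrString)

-- ===== LEMMAS AND PROOFS =====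
theorem pvScanA_eq (p : Char → Bool) (acc : Int) (l : List Char) :
    pvScanA p acc l = acc + (if l.any p then 1 else 0) := by
  induction l with
  | nil => simp [pvScanA]
  | cons c r ih => by_cases h : p c <;> simp [pvScanA, h, ih]

theorem pvGoB_eq (l : List Char) (d u lo : Bool) :
    pvGoB d u lo l =
      pvFlagSum (d || l.any PySem.Chars.isdigit)
        (u || l.any (fun c => !PySem.Chars.isdigit c && PySem.Chars.isupper c))
        (lo || l.any (fun c => !PySem.Chars.isdigit c && !PySem.Chars.isupper c && PySem.Chars.islower c)) := by
  induction l generalizing d u lo with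
  | nil => simp [pvGoB]
  | cons c r ih =>
    simp only [pvGoB, List.any_cons]
    by_cases hd : PySem.Chars.isdigit c <;>
      by_cases hu : PySem.Chars.isupper c <;>
        by_cases hl : PySem.Chars.islower c <;>
          simp only [hd, hu, hl, Bool.not_true, Bool.not_false, Bool.true_and, Bool.and_true,
            Bool.and_false, if_true, Bool.true_or, Bool.false_or, ih] <;>
        split_ifs with hbrk <;> simp_all [pvFlagSum]

theorem digit_not_upper (c : Char) (h : PySem.Chars.isdigit c = true) :
    PySem.Chars.isupper c = false := by
  simp [PySem.Chars.isdigit] at h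
  simp [PySem.Chars.isupper]
  intro hA
  exact absurd h.2 (not_le.mpr (lt_of_lt_of_le (by decide : ('9':Char) < 'A') hA))

theorem digit_not_lower (c : Char) (h : PySem.Chars.isdigit c = true) :
    PySem.Chars.islower c = false := by
  simp [PySem.Chars.isdigit] at h
  simp [PySem.Chars.islower]
  intro hA
  exact absurd h.2 (not_le.mpr (lt_of_lt_of_le (by decide : ('9':Char) < 'a') hA))

theorem upper_not_lower (c : Char) (h : PySem.Chars.isupper c = true) :
    PySem.Chars.islower c = false := by
  simp [PySem.Chars.isupper] at h
  simp [PySem.Chars.islower]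
  intro hA
  exact absurd h.2 (not_le.mpr (lt_of_lt_of_le (by decide : ('Z':Char) < 'a') hA))

-- the elif-chain predicates coincide with the plain predicates (the three character classes are disjoint)
theorem elif_upper (c : Char) :
    (!PySem.Chars.isdigit c && PySem.Chars.isupper c) = PySem.Chars.isupper c := by
  by_cases hd : PySem.Chars.isdigit c
  · simp [hd, digit_not_upper c hd]
  · simp [hd]

theorem elif_lower (c : Char) :
    (!PySem.Chars.isdigit c && !PySem.Chars.isupper c && PySem.Chars.islower c)
      = PySem.Chars.islower c := by
  by_cases hl : PySem.Chars.islower c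
  · have hd : PySem.Chars.isdigit c = false := by
      by_cases h : PySem.Chars.isdigit c
      · exact absurd (digit_not_lower c h) (by simp [hl])
      · simpa using h
    have hu : PySem.Chars.isupper c = false := by
      by_cases h : PySem.Chars.isupper c
      · exact absurd (upper_not_lower c h) (by simp [hl])
      · simpa using h
    simp [hd, hu, hl]
  · simp [hl]

-- ===== VERDICT (by name: the statement is the Claim_ definition above) =====
theorem typesContained_spec : Claim_equal_typesContained := by
  intro s _
  unfold Spec_typesContained typesContained typesContained_alt
  simp only [pvScanA_eq, pvGoB_eq, elif_upper, elif_lower, Bool.false_or]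
  unfold pvFlagSum
  split_ifs <;> omega
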